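-- pv_equiv track=rewrite | github.com/eirikhoe/advent-of-code | 2023/21/sol.py | _base_reachable_fun
-- ===== SOURCE A (Python) =====
-- def valid_pos(pos, map):
--     return (0 <= pos[0] < len(map)) and (0 <= pos[1] < len(map[0]))
--
-- def update_pos(pos, dir):
--     return tuple([pos[k] + dir[k] for k in range(2)])
--
-- def get_cands(pos, garden):
--     cands = []
--     for dir in ((0, 1), (0, -1), (-1, 0), (1, 0)):
--         cand = update_pos(pos, dir)
--         if valid_pos(cand, garden) and (garden[cand[0]][cand[1]] == "."):
--             cands.append(cand)
--     return cands
--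
-- def _base_reachable_fun(garden, start_pos, n_steps):
--     new_reachable = [1]
--     seen = set([start_pos])
--     search = [start_pos]
--     for i in range(n_steps):
--         new_search = []
--         while len(search) > 0:
--             pos = search.pop()
--             cands = get_cands(pos, garden)
--             for cand in cands:
--                 if cand not in seen:
--                     new_search.append(cand)
--                     seen.add(cand)
--         new_reachable.append(len(new_search))
--         search = new_search
--         if len(search) == 0:
--             break
--     start_ind = n_steps % 2
--     return sum(new_reachable[start_ind::2]), i
-- ===== SOURCE B (Python) =====
-- def _base_reachable_fun(garden, start_pos, n_steps):
--     rows = len(garden)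
--     cols = len(garden[0]) if garden else 0
--     dist = {start_pos: 0}
--     maxdist = 0
--     for d in range(1, n_steps + 1):
--         added = False
--         for r in range(rows):
--             for c in range(cols):
--                 if garden[r][c] == "." and (r, c) not in dist and (
--                     dist.get((r, c + 1)) == d - 1
--                     or dist.get((r, c - 1)) == d - 1
--                     or dist.get((r - 1, c)) == d - 1
--                     or dist.get((r + 1, c)) == d - 1
--                 ):
--                     dist[(r, c)] = d
--                     maxdist = d
--                     added = True
--         if not added:
--             break
--     total = sum(1 for v in dist.values() if v % 2 == n_steps % 2)
--     return total, min(maxdist, n_steps - 1)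
-- ===== Notes on version B (the rewrite author's own statement) =====
-- stated objective: alternative
-- what changed: B replaces A's queue-based BFS (frontier list popped cell by cell with a seen set and per-layer count list) by Bellman-Ford-style rounds: each round scans every grid cell and assigns distance d to unassigned '.' cells with a neighbour at distance d-1, then the parity count and min(maxdist, n_steps-1) are read off the distance table.
-- outside the precondition, e.g. on _base_reachable_fun(['##', '#'], (0, 0), 1): A returns (0, 0), B raises IndexError; on _base_reachable_fun(['...'], (0, 1), 0): A raises UnboundLocalError, B returns (1, -1)
import Mathlib
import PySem

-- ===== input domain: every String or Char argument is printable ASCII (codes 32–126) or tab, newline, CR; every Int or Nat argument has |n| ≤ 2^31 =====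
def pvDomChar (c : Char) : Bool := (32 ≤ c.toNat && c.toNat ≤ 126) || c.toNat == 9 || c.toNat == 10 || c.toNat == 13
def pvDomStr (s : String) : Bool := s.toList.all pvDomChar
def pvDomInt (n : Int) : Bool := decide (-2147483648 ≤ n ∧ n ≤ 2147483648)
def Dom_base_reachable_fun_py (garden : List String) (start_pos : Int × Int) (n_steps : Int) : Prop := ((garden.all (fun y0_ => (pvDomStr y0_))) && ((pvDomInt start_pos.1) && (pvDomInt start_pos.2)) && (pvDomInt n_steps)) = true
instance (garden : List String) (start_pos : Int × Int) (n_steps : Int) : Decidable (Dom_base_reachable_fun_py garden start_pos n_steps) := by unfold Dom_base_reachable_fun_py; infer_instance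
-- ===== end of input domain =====

-- B replaces A's queue BFS (frontier popped cell by cell, seen set, per-layer count list, parity
-- slice-sum) by Bellman-Ford-style rounds: each round scans the whole grid and assigns distance d
-- to unassigned '.' cells with a neighbour at distance d-1; the answers are read off the distance
-- table afterwards (alternative decomposition; equality of return values proved below).

-- ===== PORT A =====

-- valid_pos(pos, map); map[0] is only evaluated when 0 <= pos[0] < len(map) (Python short-circuit),
-- and then headD "" is exactly map[0]
def valid_pos_py (pos : Int × Int) (m : List String) : Bool :=
  (decide (0 ≤ pos.1) && decide (pos.1 < (m.length : Int))) &&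
  (decide (0 ≤ pos.2) && decide (pos.2 < (PySem.Str.len (m.headD ""))))

-- update_pos(pos, dir): tuple([pos[k] + dir[k] for k in range(2)]) — componentwise add
def update_pos_py (pos : Int × Int) (dir : Int × Int) : Int × Int :=
  (pos.1 + dir.1, pos.2 + dir.2)

-- garden[cand[0]][cand[1]] == "." ; row index is in range when valid_pos holds (pyGetD exact there),
-- column read with pyGet? (none = IndexError, excluded by Pre_)
def is_plot_py (garden : List String) (cand : Int × Int) : Bool :=
  PySem.Str.pyGet? (PySem.List.pyGetD garden cand.1 "") cand.2 == some '.'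

-- get_cands(pos, garden)
def get_cands_py (pos : Int × Int) (garden : List String) : List (Int × Int) :=
  [((0:Int),(1:Int)), (0,-1), (-1,0), (1,0)].foldl (fun cands dir =>
    let cand := update_pos_py pos dir
    if valid_pos_py cand garden && is_plot_py garden cand then cands ++ [cand] else cands) []

-- the 'while len(search) > 0' loop: pop from the end of search
def a_while (garden : List String) (search : List (Int × Int))
    (seen : PySem.Set (Int × Int)) (new_search : List (Int × Int)) :
    List (Int × Int) × PySem.Set (Int × Int) :=
  if h : search = [] then (new_search, seen)
  else
    a_while garden search.dropLast
      (((get_cands_py (search.getLast h) garden).foldl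
        (fun (st : List (Int × Int) × PySem.Set (Int × Int)) cand =>
          if !(PySem.Set.contains st.2 cand) then (st.1 ++ [cand], PySem.Set.add st.2 cand)
          else st) (new_search, seen))).2
      (((get_cands_py (search.getLast h) garden).foldl
        (fun (st : List (Int × Int) × PySem.Set (Int × Int)) cand =>
          if !(PySem.Set.contains st.2 cand) then (st.1 ++ [cand], PySem.Set.add st.2 cand)
          else st) (new_search, seen))).1
  termination_by search.length
  decreasing_by
    have : search.length ≠ 0 := fun hl => h (List.eq_nil_of_length_eq_zero hl)
    simp [List.length_dropLast]; omega

-- the 'for i in range(n_steps)' loop with its break; Python's range is lazy, so the port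
-- iterates i directly; i_prev is the current value of i (unbound before the first iteration:
-- that state is outside Pre_)
def a_loop (garden : List String) (n_steps : Int) (i : Int)
    (seen : PySem.Set (Int × Int)) (search : List (Int × Int)) (new_reachable : List Int)
    (i_prev : Int) : List Int × Int :=
  if h : i < n_steps then
    if (a_while garden search seen []).1.length = 0 then
      (new_reachable ++ [(((a_while garden search seen []).1.length : Nat) : Int)], i)
    else
      a_loop garden n_steps (i + 1) (a_while garden search seen []).2
        (a_while garden search seen []).1
        (new_reachable ++ [(((a_while garden search seen []).1.length : Nat) : Int)]) i
  else (new_reachable, i_prev)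
  termination_by (n_steps - i).toNat
  decreasing_by omega

-- sum(new_reachable[start_ind::2]) — slice with step 2 (step ≠ 0, so slice? is some)
def a_slice_sum (nr : List Int) (start_ind : Int) : Int :=
  ((PySem.List.slice? nr (some start_ind) none 2).getD []).sum

def base_reachable_fun_py (garden : List String) (start_pos : Int × Int) (n_steps : Int) : Int × Int :=
  (a_slice_sum
    (a_loop garden n_steps 0 (PySem.Set.ofList [start_pos]) [start_pos] [1] (-1)).1
    (PySem.Int.mod n_steps 2),
   (a_loop garden n_steps 0 (PySem.Set.ofList [start_pos]) [start_pos] [1] (-1)).2)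

-- ===== PORT B =====

-- garden[r][c] == "."
def pvDot (garden : List String) (x : Int × Int) : Bool :=
  PySem.Str.pyGet? (PySem.List.pyGetD garden x.1 "") x.2 == some '.'

-- dist.get(nb) == d - 1 for the four neighbours of x
def pvHit (dd : PySem.Dict (Int × Int) Int) (d : Int) (x : Int × Int) : Bool :=
  (dd.get? (x.1, x.2 + 1) == some (d - 1)) || (dd.get? (x.1, x.2 - 1) == some (d - 1)) ||
  (dd.get? (x.1 - 1, x.2) == some (d - 1)) || (dd.get? (x.1 + 1, x.2) == some (d - 1))

-- the body of B's innermost loop for one cell rc in round d; state = (dist, maxdist, added)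
def b_step (garden : List String) (d : Int)
    (st : PySem.Dict (Int × Int) Int × Int × Bool) (rc : Int × Int) :
    PySem.Dict (Int × Int) Int × Int × Bool :=
  if pvDot garden rc && !(st.1.contains rc) && pvHit st.1 d rc
  then (st.1.insert rc d, d, true) else st

-- one round: 'for r in range(rows): for c in range(cols): …' with added = False at the top
def b_round (garden : List String) (rows cols d : Int)
    (dist : PySem.Dict (Int × Int) Int) (maxdist : Int) :
    PySem.Dict (Int × Int) Int × Int × Bool :=
  (PySem.List.pyRange 0 rows 1).foldl
    (fun st r => (PySem.List.pyRange 0 cols 1).foldl (fun st c => b_step garden d st (r, c)) st)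
    (dist, maxdist, false)

-- 'for d in range(1, n_steps + 1)' with its break (lazy range: iterate d up to stop)
def b_loop (garden : List String) (rows cols stop d : Int)
    (dist : PySem.Dict (Int × Int) Int) (maxdist : Int) :
    PySem.Dict (Int × Int) Int × Int :=
  if h : d < stop then
    if (b_round garden rows cols d dist maxdist).2.2 = false then
      ((b_round garden rows cols d dist maxdist).1, (b_round garden rows cols d dist maxdist).2.1)
    else
      b_loop garden rows cols stop (d + 1) (b_round garden rows cols d dist maxdist).1
        (b_round garden rows cols d dist maxdist).2.1
  else (dist, maxdist)
  termination_by (stop - d).toNat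
  decreasing_by omega

def base_reachable_fun_py_alt (garden : List String) (start_pos : Int × Int) (n_steps : Int) : Int × Int :=
  ((((b_loop garden (garden.length : Int)
        (if garden.isEmpty then 0 else PySem.Str.len (garden.headD ""))
        (n_steps + 1) 1 ((PySem.Dict.empty).insert start_pos 0) 0).1.values.filter
      (fun v => PySem.Int.mod v 2 == PySem.Int.mod n_steps 2)).length : Int),
   min (b_loop garden (garden.length : Int)
        (if garden.isEmpty then 0 else PySem.Str.len (garden.headD ""))
        (n_steps + 1) 1 ((PySem.Dict.empty).insert start_pos 0) 0).2 (n_steps - 1))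

-- ===== PRECONDITION & SPEC =====

-- Pre_ excludes (a) n_steps ≤ 0, where A raises UnboundLocalError ('i' never bound), and
-- (b) gardens whose row 0 is longer than some later row: there A raises IndexError whenever the
-- search reaches such a short row (and B's full-grid scan raises too), and no closed-form
-- condition separates those gardens from the (accidentally returning) unreached ones, so all of
-- them are excluded.
def Pre_base_reachable_fun_py (garden : List String) (start_pos : Int × Int) (n_steps : Int) : Prop :=
  1 ≤ n_steps ∧ ∀ s ∈ garden, PySem.Str.len (garden.headD "") ≤ PySem.Str.len s

instance (garden : List String) (start_pos : Int × Int) (n_steps : Int) : Decidable (Pre_base_reachable_fun_py garden start_pos n_steps) := by unfold Pre_base_reachable_fun_py; infer_instance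

def pvWitness_base_reachable_fun_py : List String × (Int × Int) × Int := (["#..", ".#.", "..."], (0, 1), 3)

def Spec_base_reachable_fun_py (garden : List String) (start_pos : Int × Int) (n_steps : Int) (out : Int × Int) : Prop := out = base_reachable_fun_py_alt garden start_pos n_steps
instance (garden : List String) (start_pos : Int × Int) (n_steps : Int) (out : Int × Int) : Decidable (Spec_base_reachable_fun_py garden start_pos n_steps out) := by unfold Spec_base_reachable_fun_py; infer_instance

-- ===== CLAIM (what is proved, stated in full; the proofs are below) =====
def Claim_equal_base_reachable_fun_py : Prop := ∀ (garden : List String) (start_pos : Int × Int) (n_steps : Int), Dom_base_reachable_fun_py garden start_pos n_steps → Pre_base_reachable_fun_py garden start_pos n_steps → Spec_base_reachable_fun_py garden start_pos n_steps (base_reachable_fun_py garden start_pos n_steps)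

-- ===== LEMMAS AND PROOFS =====

-- helper notions used only by the proofs: the list of new cells discovered while scanning
-- candidate cells against an evolving seen-list

def pvNbrs (p : Int × Int) : List (Int × Int) :=
  [(p.1, p.2 + 1), (p.1, p.2 - 1), (p.1 - 1, p.2), (p.1 + 1, p.2)]

def pvGood (garden : List String) (c : Int × Int) : Bool :=
  valid_pos_py c garden && is_plot_py garden c

def pvDiscL (garden : List String) : List (Int × Int) → List (Int × Int) → List (Int × Int)
  | [], _ => []
  | c :: cl, s =>
    if pvGood garden c = true ∧ c ∉ s then c :: pvDiscL garden cl (s ++ [c])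
    else pvDiscL garden cl s

def pvDiscAll (garden : List String) : List (Int × Int) → List (Int × Int) → List (Int × Int)
  | [], _ => []
  | p :: ps, s =>
    let l := pvDiscL garden (pvNbrs p) s
    l ++ pvDiscAll garden ps (s ++ l)

-- the 'for i in range(n_steps)' loop with its break; i₀ is the current value of i
-- (Python's i is unbound before the first iteration: that state is outside Pre_)
def pvALoopR (garden : List String) :
    List Int → PySem.Set (Int × Int) → List (Int × Int) → List Int → Int → (List Int × Int)
  | [], _seen, _search, new_reachable, i => (new_reachable, i)
  | j :: rest, seen, search, new_reachable, _i =>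
    if (a_while garden search seen []).1.length = 0 then
      (new_reachable ++ [(((a_while garden search seen []).1.length : Nat) : Int)], j)
    else
      pvALoopR garden rest (a_while garden search seen []).2 (a_while garden search seen []).1
        (new_reachable ++ [(((a_while garden search seen []).1.length : Nat) : Int)]) j

-- 'for d in range(1, n_steps + 1)' with its break, over an explicit index list
def pvBLoopR (garden : List String) (rows cols : Int) :
    List Int → PySem.Dict (Int × Int) Int → Int → PySem.Dict (Int × Int) Int × Int
  | [], dist, maxdist => (dist, maxdist)
  | d :: rest, dist, maxdist =>
    if (b_round garden rows cols d dist maxdist).2.2 = false then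
      ((b_round garden rows cols d dist maxdist).1, (b_round garden rows cols d dist maxdist).2.1)
    else
      pvBLoopR garden rows cols rest (b_round garden rows cols d dist maxdist).1
        (b_round garden rows cols d dist maxdist).2.1

theorem pvALoop_eqAux (garden : List String) (n : Int) : ∀ (m : Nat) (i : Int)
    (seen : PySem.Set (Int × Int)) (search : List (Int × Int)) (nr : List Int) (ip : Int),
    (n - i).toNat = m →
    a_loop garden n i seen search nr ip =
      pvALoopR garden (PySem.List.pyRange i n 1) seen search nr ip := by
  intro m
  induction m using Nat.strong_induction_on with
  | _ m ih =>
  intro i seen search nr ip hm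
  by_cases h : i < n
  · rw [a_loop, dif_pos h, PySem.List.pyRange_one_cons h]
    simp only [pvALoopR]
    split
    · rfl
    · exact ih _ (by omega) (i + 1) _ _ _ _ rfl
  · rw [a_loop, dif_neg h, PySem.List.pyRange_one_eq_nil (by omega)]
    rfl

theorem pvALoop_pyRange (garden : List String) (n i : Int) (seen : PySem.Set (Int × Int))
    (search : List (Int × Int)) (nr : List Int) (ip : Int) :
    a_loop garden n i seen search nr ip =
      pvALoopR garden (PySem.List.pyRange i n 1) seen search nr ip :=
  pvALoop_eqAux garden n ((n - i).toNat) i seen search nr ip rfl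

theorem pvBLoop_eqAux (garden : List String) (rows cols stop : Int) : ∀ (m : Nat) (d : Int)
    (dist : PySem.Dict (Int × Int) Int) (maxdist : Int),
    (stop - d).toNat = m →
    b_loop garden rows cols stop d dist maxdist =
      pvBLoopR garden rows cols (PySem.List.pyRange d stop 1) dist maxdist := by
  intro m
  induction m using Nat.strong_induction_on with
  | _ m ih =>
  intro d dist maxdist hm
  by_cases h : d < stop
  · rw [b_loop, dif_pos h, PySem.List.pyRange_one_cons h]
    simp only [pvBLoopR]
    split
    · rfl
    · exact ih _ (by omega) (d + 1) _ _ rfl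
  · rw [b_loop, dif_neg h, PySem.List.pyRange_one_eq_nil (by omega)]
    rfl

theorem pvBLoop_pyRange (garden : List String) (rows cols stop d : Int)
    (dist : PySem.Dict (Int × Int) Int) (maxdist : Int) :
    b_loop garden rows cols stop d dist maxdist =
      pvBLoopR garden rows cols (PySem.List.pyRange d stop 1) dist maxdist :=
  pvBLoop_eqAux garden rows cols stop ((stop - d).toNat) d dist maxdist rfl

def pvCnt (dist : PySem.Dict (Int × Int) Int) (d : Int) : Int :=
  (dist.items.countP (fun e => e.2 == d) : Int)

theorem pvMem_discL (garden : List String) (cl : List (Int × Int)) :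
    ∀ (s : List (Int × Int)) (x : Int × Int),
      x ∈ pvDiscL garden cl s ↔ x ∈ cl ∧ pvGood garden x = true ∧ x ∉ s := by
  induction cl with
  | nil => intro s x; simp [pvDiscL]
  | cons c cl ih =>
    intro s x
    simp only [pvDiscL]
    split
    · rename_i hc
      simp only [List.mem_cons, ih]
      constructor
      · rintro (rfl | ⟨hxcl, hg, hxs⟩)
        · exact ⟨Or.inl rfl, hc.1, hc.2⟩
        · refine ⟨Or.inr hxcl, hg, fun hx => hxs ?_⟩
          simp [hx]
      · rintro ⟨(rfl | hxcl), hg, hxs⟩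
        · exact Or.inl rfl
        · by_cases hxc : x = c
          · exact Or.inl hxc
          · refine Or.inr ⟨hxcl, hg, ?_⟩
            simp [hxs, hxc]
    · rename_i hc
      rw [ih]
      rw [not_and_or, not_not] at hc
      constructor
      · rintro ⟨h1, h2, h3⟩; exact ⟨List.mem_cons_of_mem _ h1, h2, h3⟩
      · rintro ⟨h1, h2, h3⟩
        rcases List.mem_cons.1 h1 with rfl | h1
        · rcases hc with hc | hc
          · exact absurd h2 hc
          · exact absurd hc h3
        · exact ⟨h1, h2, h3⟩

theorem pvNodup_discL (garden : List String) (cl : List (Int × Int)) :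
    ∀ (s : List (Int × Int)), (pvDiscL garden cl s).Nodup := by
  induction cl with
  | nil => intro s; simp [pvDiscL]
  | cons c cl ih =>
    intro s
    simp only [pvDiscL]
    split
    · refine List.Nodup.cons ?_ (ih _)
      intro hmem
      have := ((pvMem_discL garden cl (s ++ [c]) c).1 hmem).2.2
      simp at this
    · exact ih s

theorem pvMem_discAll (garden : List String) (ps : List (Int × Int)) :
    ∀ (s : List (Int × Int)) (x : Int × Int),
      x ∈ pvDiscAll garden ps s ↔
        x ∉ s ∧ ∃ p ∈ ps, x ∈ pvNbrs p ∧ pvGood garden x = true := by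
  induction ps with
  | nil => intro s x; simp [pvDiscAll]
  | cons p ps ih =>
    intro s x
    simp only [pvDiscAll, List.mem_append, ih, pvMem_discL]
    constructor
    · rintro (⟨h1, h2, h3⟩ | ⟨h1, q, hq, h2⟩)
      · exact ⟨h3, p, List.mem_cons_self .., h1, h2⟩
      · push_neg at h1
        exact ⟨h1.1, q, List.mem_cons_of_mem _ hq, h2⟩
    · rintro ⟨hxs, q, hq, hxq, hg⟩
      by_cases hxl : x ∈ pvDiscL garden (pvNbrs p) s
      · left; exact (pvMem_discL garden (pvNbrs p) s x).1 hxl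
      · right
        rcases List.mem_cons.1 hq with rfl | hq
        · exact absurd ((pvMem_discL garden (pvNbrs q) s x).2 ⟨hxq, hg, hxs⟩) hxl
        · refine ⟨?_, q, hq, hxq, hg⟩
          push_neg
          refine ⟨hxs, fun ha hb => Classical.byContradiction fun hc => hxl ?_⟩
          exact (pvMem_discL garden (pvNbrs p) s x).2 ⟨ha, hb, hc⟩

theorem pvNodup_discAll (garden : List String) (ps : List (Int × Int)) :
    ∀ (s : List (Int × Int)), (pvDiscAll garden ps s).Nodup := by
  induction ps with
  | nil => intro s; simp [pvDiscAll]
  | cons p ps ih =>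
    intro s
    simp only [pvDiscAll]
    refine List.Nodup.append (pvNodup_discL garden _ s) (ih _) ?_
    intro x hx1 hx2
    have := ((pvMem_discAll garden ps _ x).1 hx2).1
    rw [List.mem_append] at this
    push_neg at this
    exact this.2 hx1

theorem pvGet_cands_eq (garden : List String) (p : Int × Int) :
    get_cands_py p garden = (pvNbrs p).filter (pvGood garden) := by
  simp only [get_cands_py, update_pos_py, pvNbrs, pvGood, List.foldl_cons, List.foldl_nil,
    List.filter_cons, List.filter_nil]
  norm_num
  simp only [← sub_eq_add_neg]
  split_ifs <;> simp

-- A's inner candidate fold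
theorem pvAFold_char (garden : List String) (cl : List (Int × Int)) :
    ∀ (ns s : List (Int × Int)),
      ((cl.filter (pvGood garden)).foldl
        (fun (st : List (Int × Int) × PySem.Set (Int × Int)) cand =>
          if !(PySem.Set.contains st.2 cand) then (st.1 ++ [cand], PySem.Set.add st.2 cand)
          else st) (ns, s)) =
      (ns ++ pvDiscL garden cl s, s ++ pvDiscL garden cl s) := by
  induction cl with
  | nil => intro ns s; simp [pvDiscL]
  | cons c cl ih =>
    intro ns s
    by_cases hg : pvGood garden c = true
    · rw [List.filter_cons_of_pos hg, List.foldl_cons]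
      by_cases hcs : c ∈ s
      · have hcon : PySem.Set.contains s c = true := (PySem.Set.contains_iff s c).2 hcs
        have hskip : pvDiscL garden (c :: cl) s = pvDiscL garden cl s := by
          rw [pvDiscL, if_neg]; rintro ⟨-, h2⟩; exact h2 hcs
        have happ : (if (!(PySem.Set.contains (ns, s).2 c)) = true then ((ns, s).1 ++ [c], PySem.Set.add (ns, s).2 c)
            else (ns, s)) = (ns, s) := by
          rw [show PySem.Set.contains (ns, s).2 c = true from hcon]; rfl
        rw [happ, hskip]
        exact ih ns s
      · have hcon : PySem.Set.contains s c = false := by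
          cases h : PySem.Set.contains s c with
          | false => rfl
          | true => exact absurd ((PySem.Set.contains_iff s c).1 h) hcs
        have hstep : pvDiscL garden (c :: cl) s = c :: pvDiscL garden cl (s ++ [c]) := by
          rw [pvDiscL, if_pos ⟨hg, hcs⟩]
        have happ : (if (!(PySem.Set.contains (ns, s).2 c)) = true then ((ns, s).1 ++ [c], PySem.Set.add (ns, s).2 c)
            else (ns, s)) = (ns ++ [c], s ++ [c]) := by
          rw [show PySem.Set.contains (ns, s).2 c = false from hcon]
          simp [PySem.Set.add_of_not_mem hcs]
        rw [happ, hstep, ih (ns ++ [c]) (s ++ [c])]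
        simp [List.append_assoc]
    · have hg' : pvGood garden c = false := by
        cases h : pvGood garden c with
        | false => rfl
        | true => exact absurd h hg
      rw [List.filter_cons_of_neg (by simp [hg'])]
      have hskip : pvDiscL garden (c :: cl) s = pvDiscL garden cl s := by
        rw [pvDiscL, if_neg]; rintro ⟨h1, -⟩; exact hg h1
      rw [hskip, ih]

-- A's while loop processes search back to front
theorem pvAWhile_char (garden : List String) (search : List (Int × Int)) :
    ∀ (seen ns : List (Int × Int)),
      a_while garden search seen ns =
        (ns ++ pvDiscAll garden search.reverse seen,
         seen ++ pvDiscAll garden search.reverse seen) := by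
  induction search using List.reverseRecOn with
  | nil => intro seen ns; rw [a_while]; simp [pvDiscAll]
  | append_singleton xs x ih =>
    intro seen ns
    rw [a_while, dif_neg (by simp)]
    rw [pvGet_cands_eq, pvAFold_char]
    have hdrop : (xs ++ [x]).dropLast = xs := by simp
    have hlast : ∀ h, (xs ++ [x]).getLast h = x := fun h => by simp
    rw [hlast, hdrop, ih]
    simp [pvDiscAll, List.append_assoc]

theorem pvDiscAll_congr (garden : List String) (ps₁ ps₂ s₁ s₂ : List (Int × Int))
    (hps : ∀ x, x ∈ ps₁ ↔ x ∈ ps₂) (hs : ∀ x, x ∈ s₁ ↔ x ∈ s₂) :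
    (∀ x, x ∈ pvDiscAll garden ps₁ s₁ ↔ x ∈ pvDiscAll garden ps₂ s₂) ∧
      (pvDiscAll garden ps₁ s₁).length = (pvDiscAll garden ps₂ s₂).length := by
  have hmem : ∀ x, x ∈ pvDiscAll garden ps₁ s₁ ↔ x ∈ pvDiscAll garden ps₂ s₂ := by
    intro x
    rw [pvMem_discAll, pvMem_discAll, hs]
    constructor
    · rintro ⟨h1, q, hq, h2⟩; exact ⟨h1, q, (hps q).1 hq, h2⟩
    · rintro ⟨h1, q, hq, h2⟩; exact ⟨h1, q, (hps q).2 hq, h2⟩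
  refine ⟨hmem, List.Perm.length_eq ?_⟩
  exact (List.perm_ext_iff_of_nodup (pvNodup_discAll garden ps₁ s₁)
    (pvNodup_discAll garden ps₂ s₂)).2 hmem

-- ----- B-side characterisation -----

-- lookup in a dict literally built as an appended items list
theorem pvGet?_mk_append (l1 l2 : List ((Int × Int) × Int)) (x : Int × Int) :
    (PySem.Dict.mk (l1 ++ l2)).get? x =
      ((PySem.Dict.mk l1).get? x).or ((PySem.Dict.mk l2).get? x) := by
  induction l1 with
  | nil => simp [show (PySem.Dict.mk ([] : List ((Int × Int) × Int))).get? x = none from rfl]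
  | cons e l1 ih =>
    rcases e with ⟨k, v⟩
    rw [List.cons_append, PySem.Dict.get?_mk_cons, PySem.Dict.get?_mk_cons]
    split
    · rfl
    · exact ih

theorem pvGet?_mk_map_const (S : List (Int × Int)) (d : Int) (x : Int × Int) :
    (PySem.Dict.mk (S.map (fun c => (c, d)))).get? x = if x ∈ S then some d else none := by
  induction S with
  | nil => simp [show (PySem.Dict.mk ([] : List ((Int × Int) × Int))).get? x = none from rfl]
  | cons c S ih =>
    rw [List.map_cons, PySem.Dict.get?_mk_cons]
    by_cases hc : c = x
    · subst hc; simp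
    · rw [if_neg (by simpa using hc), ih]
      simp [List.mem_cons, Ne.symm hc]

-- the augmented dict: lookup falls back through the old entries, then the new constant-d ones
theorem pvGet?_aug (dist : PySem.Dict (Int × Int) Int) (S : List (Int × Int)) (d : Int)
    (x : Int × Int) :
    (PySem.Dict.mk (dist.items ++ S.map (fun c => (c, d)))).get? x =
      (dist.get? x).or (if x ∈ S then some d else none) := by
  rw [pvGet?_mk_append, pvGet?_mk_map_const]

theorem pvKeys_aug (dist : PySem.Dict (Int × Int) Int) (S : List (Int × Int)) (d : Int) :
    (PySem.Dict.mk (dist.items ++ S.map (fun c => (c, d)))).keys = dist.keys ++ S := by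
  simp [PySem.Dict.keys, Function.comp_def]

-- a hit test is unchanged by appending value-d entries (d ≠ d - 1)
theorem pvHit_aug (dist : PySem.Dict (Int × Int) Int) (S : List (Int × Int)) (d : Int)
    (x : Int × Int) :
    pvHit (PySem.Dict.mk (dist.items ++ S.map (fun c => (c, d)))) d x = pvHit dist d x := by
  have key : ∀ nb : Int × Int,
      ((PySem.Dict.mk (dist.items ++ S.map (fun c => (c, d)))).get? nb == some (d - 1)) =
        (dist.get? nb == some (d - 1)) := by
    intro nb
    rw [pvGet?_aug]
    cases hg : dist.get? nb with
    | some v => rfl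
    | none =>
      show ((Option.or none (if nb ∈ S then some d else none)) == some (d - 1)) = (none == some (d - 1))
      rw [Option.none_or]
      split_ifs with hmem
      · have hne : d ≠ d - 1 := by omega
        simp [hne]
      · rfl
  unfold pvHit
  rw [key, key, key, key]

-- the frozen per-cell predicate of one round
def pvP (garden : List String) (dist : PySem.Dict (Int × Int) Int) (d : Int)
    (x : Int × Int) : Bool :=
  pvDot garden x && !(dist.contains x) && pvHit dist d x

-- scanning a duplicate-free cell list accumulates exactly the filter by the frozen predicate
theorem pvBScanAux (garden : List String) (dist : PySem.Dict (Int × Int) Int) (d : Int)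
    :
    ∀ (cells S : List (Int × Int)) (M : Int) (a0 : Bool),
      cells.Nodup → (∀ x ∈ cells, x ∉ S) →
      cells.foldl (fun st c => b_step garden d st c)
          (PySem.Dict.mk (dist.items ++ S.map (fun c => (c, d))), M, a0) =
        (PySem.Dict.mk (dist.items ++ (S ++ cells.filter (pvP garden dist d)).map (fun c => (c, d))),
         (if (cells.filter (pvP garden dist d)).isEmpty then M else d),
         (a0 || !(cells.filter (pvP garden dist d)).isEmpty)) := by
  intro cells
  induction cells with
  | nil => intro S M a0 _ _; simp
  | cons x cells ih =>
    intro S M a0 hndc hdisj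
    have hxS : x ∉ S := hdisj x (List.mem_cons_self ..)
    have hcond : (pvDot garden x &&
        !((PySem.Dict.mk (dist.items ++ S.map (fun c => (c, d)))).contains x) &&
        pvHit (PySem.Dict.mk (dist.items ++ S.map (fun c => (c, d)))) d x) =
        pvP garden dist d x := by
      have hcontains : (PySem.Dict.mk (dist.items ++ S.map (fun c => (c, d)))).contains x =
          dist.contains x := by
        rw [PySem.Dict.contains_eq_decide_mem_keys, PySem.Dict.contains_eq_decide_mem_keys,
          pvKeys_aug]
        simp [List.mem_append, hxS]
      rw [hcontains, pvHit_aug]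
      rfl
    have hstep : b_step garden d
        (PySem.Dict.mk (dist.items ++ S.map (fun c => (c, d))), M, a0) x =
        (if pvP garden dist d x then
          ((PySem.Dict.mk (dist.items ++ S.map (fun c => (c, d)))).insert x d, d, true)
        else (PySem.Dict.mk (dist.items ++ S.map (fun c => (c, d))), M, a0)) := by
      unfold b_step
      show (if (pvDot garden x &&
          !((PySem.Dict.mk (dist.items ++ S.map (fun c => (c, d)))).contains x) &&
          pvHit (PySem.Dict.mk (dist.items ++ S.map (fun c => (c, d)))) d x) = true then
          ((PySem.Dict.mk (dist.items ++ S.map (fun c => (c, d)))).insert x d, d, true)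
        else (PySem.Dict.mk (dist.items ++ S.map (fun c => (c, d))), M, a0)) = _
      rw [hcond]
    rw [List.foldl_cons, hstep]
    by_cases hP : pvP garden dist d x = true
    · have hnotc : dist.contains x = false := by
        have hP' := hP
        simp only [pvP, Bool.and_eq_true, Bool.not_eq_true'] at hP'
        exact hP'.1.2
      have hins : (PySem.Dict.mk (dist.items ++ S.map (fun c => (c, d)))).insert x d =
          PySem.Dict.mk (dist.items ++ (S ++ [x]).map (fun c => (c, d))) := by
        apply PySem.Dict.ext
        have hnc : (PySem.Dict.mk (dist.items ++ S.map (fun c => (c, d)))).contains x = false := by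
          rw [PySem.Dict.contains_eq_decide_mem_keys, pvKeys_aug]
          have : x ∉ dist.keys := by
            rw [← PySem.Dict.contains_iff_mem_keys]
            simp [hnotc]
          simp [List.mem_append, hxS, this]
        rw [PySem.Dict.items_insert_of_not_contains _ _ hnc]
        simp [List.append_assoc]
      rw [if_pos hP, hins]
      have hrec := ih (S ++ [x]) d true (List.Nodup.of_cons hndc)
        (by
          intro y hy
          rw [List.mem_append, List.mem_singleton]
          push_neg
          exact ⟨hdisj y (List.mem_cons_of_mem _ hy),
            fun hyx => (List.nodup_cons.1 hndc).1 (hyx ▸ hy)⟩)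
      rw [hrec, List.filter_cons_of_pos hP]
      simp [List.append_assoc, List.isEmpty_iff]
    · have hPf : pvP garden dist d x = false := by
        cases h : pvP garden dist d x with
        | false => rfl
        | true => exact absurd h hP
      rw [if_neg (by simp [hPf])]
      rw [ih S M a0 (List.Nodup.of_cons hndc)
        (fun y hy => hdisj y (List.mem_cons_of_mem _ hy))]
      rw [List.filter_cons_of_neg (by simp [hPf])]

-- the grid cell list B scans, row-major
def pvCells (rows cols : Int) : List (Int × Int) :=
  (PySem.List.pyRange 0 rows 1).flatMap
    (fun r => (PySem.List.pyRange 0 cols 1).map (fun c => (r, c)))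

theorem pvCells_nodup (rows cols : Int) : (pvCells rows cols).Nodup := by
  apply List.nodup_flatMap.2
  constructor
  · intro r _
    exact (PySem.List.nodup_pyRange_one 0 cols).map
      (fun a b hab => by simpa using congrArg Prod.snd hab)
  · refine (PySem.List.nodup_pyRange_one 0 rows).imp ?_
    intro r1 r2 hne x h1 h2
    obtain ⟨c1, -, rfl⟩ := List.mem_map.1 h1
    obtain ⟨c2, -, h⟩ := List.mem_map.1 h2
    exact hne (by simpa using congrArg Prod.fst h.symm)

theorem pvCells_mem (rows cols : Int) (x : Int × Int) :
    x ∈ pvCells rows cols ↔ (0 ≤ x.1 ∧ x.1 < rows) ∧ (0 ≤ x.2 ∧ x.2 < cols) := by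
  unfold pvCells
  rw [List.mem_flatMap]
  constructor
  · rintro ⟨r, hr, hx⟩
    obtain ⟨c, hc, rfl⟩ := List.mem_map.1 hx
    rw [PySem.List.mem_pyRange_one] at hr hc
    exact ⟨hr, hc⟩
  · rintro ⟨h1, h2⟩
    exact ⟨x.1, PySem.List.mem_pyRange_one.2 h1,
      List.mem_map.2 ⟨x.2, PySem.List.mem_pyRange_one.2 h2, rfl⟩⟩

-- one round is the scan of the grid cell list
theorem pvBRound_eq_scan (garden : List String) (rows cols d : Int)
    (dist : PySem.Dict (Int × Int) Int) (M : Int) :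
    b_round garden rows cols d dist M =
      (pvCells rows cols).foldl (fun st c => b_step garden d st c) (dist, M, false) := by
  unfold b_round pvCells
  rw [List.foldl_flatMap]
  simp only [List.foldl_map]

-- pvGood split into range and plot parts (with B's cols expression)
theorem pvGood_iff (garden : List String) (x : Int × Int) :
    pvGood garden x = true ↔
      ((0 ≤ x.1 ∧ x.1 < (garden.length : Int)) ∧
       (0 ≤ x.2 ∧ x.2 < (if garden.isEmpty then 0 else PySem.Str.len (garden.headD "")))) ∧
      pvDot garden x = true := by
  cases garden with
  | nil =>
    simp [pvGood, valid_pos_py]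
  | cons g gs =>
    simp [pvGood, valid_pos_py, is_plot_py, pvDot, and_assoc]

-- neighbourhood symmetry
theorem pvNbrs_symm (x p : Int × Int) : x ∈ pvNbrs p ↔ p ∈ pvNbrs x := by
  simp only [pvNbrs, List.mem_cons, List.not_mem_nil, or_false, Prod.ext_iff]
  constructor <;> (rintro (⟨h1, h2⟩ | ⟨h1, h2⟩ | ⟨h1, h2⟩ | ⟨h1, h2⟩) <;> omega)

-- the round's new cells are exactly A's newly discovered layer
theorem pvScan_mem (garden : List String) (dist : PySem.Dict (Int × Int) Int) (k : Int)
    (frontier : List (Int × Int))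
    (hlook : ∀ x, dist.get? x = some k ↔ x ∈ frontier) (x : Int × Int) :
    x ∈ (pvCells (garden.length : Int)
          (if garden.isEmpty then 0 else PySem.Str.len (garden.headD ""))).filter
        (pvP garden dist (k + 1)) ↔
      x ∈ pvDiscAll garden frontier dist.keys := by
  rw [List.mem_filter, pvCells_mem, pvMem_discAll]
  have hd1 : (k + 1) - 1 = k := by ring
  constructor
  · rintro ⟨hrange, hP⟩
    simp only [pvP, Bool.and_eq_true, Bool.not_eq_true'] at hP
    obtain ⟨⟨hdot, hnc⟩, hhit⟩ := hP
    have hxk : x ∉ dist.keys := by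
      rw [← PySem.Dict.contains_iff_mem_keys]
      simp [hnc]
    refine ⟨hxk, ?_⟩
    simp only [pvHit, hd1, Bool.or_eq_true, beq_iff_eq] at hhit
    have hex : ∃ nb ∈ pvNbrs x, dist.get? nb = some k := by
      rcases hhit with ((h | h) | h) | h
      · exact ⟨(x.1, x.2 + 1), by simp [pvNbrs], h⟩
      · exact ⟨(x.1, x.2 - 1), by simp [pvNbrs], h⟩
      · exact ⟨(x.1 - 1, x.2), by simp [pvNbrs], h⟩
      · exact ⟨(x.1 + 1, x.2), by simp [pvNbrs], h⟩
    obtain ⟨nb, hnb, hnbk⟩ := hex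
    refine ⟨nb, (hlook nb).1 hnbk, (pvNbrs_symm x nb).2 hnb, ?_⟩
    exact (pvGood_iff garden x).2 ⟨hrange, hdot⟩
  · rintro ⟨hxk, p, hp, hxnb, hg⟩
    obtain ⟨hrange, hdot⟩ := (pvGood_iff garden x).1 hg
    refine ⟨hrange, ?_⟩
    unfold pvP
    have hnc : dist.contains x = false := by
      rw [PySem.Dict.contains_eq_decide_mem_keys]
      simp [hxk]
    have hpk : dist.get? p = some k := (hlook p).2 hp
    have hpnb : p ∈ pvNbrs x := (pvNbrs_symm x p).1 hxnb
    have hhit : pvHit dist (k + 1) x = true := by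
      unfold pvHit
      rw [hd1]
      simp only [pvNbrs, List.mem_cons, List.not_mem_nil, or_false] at hpnb
      rcases hpnb with h | h | h | h <;> (subst h; simp [hpk])
    rw [hdot, hnc, hhit]
    rfl

-- relation between A's final (new_reachable, i) and B's final (dist, maxdist)
def pvCRel (n : Int) (resL : List Int) (resI : Int)
    (out : PySem.Dict (Int × Int) Int × Int) : Prop :=
  (∀ idx : Nat, (h : idx < resL.length) → resL[idx] = pvCnt out.1 (idx : Int)) ∧
  (∀ e ∈ out.1.items, 0 ≤ e.2 ∧ (e.2 + 1 : Int) ≤ (resL.length : Int)) ∧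
  ((2 ≤ resL.length) ∨ ((resL.length : Int) = n + 1)) ∧
  resI = min out.2 (n - 1)

-- the joint outer induction
theorem pvOuterAux (garden : List String) (n : Int) : ∀ (m : Nat) (k : Int)
    (seen search : List (Int × Int)) (nr : List Int)
    (dist : PySem.Dict (Int × Int) Int),
    (n - k).toNat = m → 0 ≤ k → k ≤ n →
    seen.Nodup →
    (∀ x, x ∈ seen ↔ x ∈ dist.keys) →
    dist.keys.Nodup →
    search.Nodup →
    search ≠ [] →
    ((nr.length : Int) = k + 1) →
    (∀ idx : Nat, (h : idx < nr.length) → nr[idx] = pvCnt dist (idx : Int)) →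
    (∀ e ∈ dist.items, 0 ≤ e.2 ∧ e.2 ≤ k) →
    (∀ x, dist.get? x = some k ↔ x ∈ search) →
    pvCRel n
      (pvALoopR garden (PySem.List.pyRange k n 1) seen search nr (k - 1)).1
      (pvALoopR garden (PySem.List.pyRange k n 1) seen search nr (k - 1)).2
      (pvBLoopR garden (garden.length : Int)
        (if garden.isEmpty then 0 else PySem.Str.len (garden.headD ""))
        (PySem.List.pyRange (k + 1) (n + 1) 1) dist k) := by
  intro m
  induction m using Nat.strong_induction_on with
  | _ m ih =>
  intro k seen search nr dist hm hk0 hkn hseenN hseenK hkeysN hsN hne hlen hcnt hvals hlook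
  by_cases hkn' : k = n
  · subst hkn'
    rw [PySem.List.pyRange_one_eq_nil (show k ≤ k from le_refl k),
      PySem.List.pyRange_one_eq_nil (show k + 1 ≤ k + 1 from le_refl _)]
    show pvCRel k nr (k - 1) (dist, k)
    refine ⟨fun idx h => hcnt idx h, ?_, ?_, ?_⟩
    · intro e he
      have h1 := hvals e he
      omega
    · right
      omega
    · show k - 1 = min k (k - 1)
      omega
  · have hklt : k < n := lt_of_le_of_ne hkn hkn'
    rw [PySem.List.pyRange_one_cons hklt,
      PySem.List.pyRange_one_cons (show k + 1 < n + 1 by omega)]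
    simp only [pvALoopR, pvBLoopR]
    rw [pvAWhile_char]
    simp only [List.nil_append]
    set LA := pvDiscAll garden search.reverse seen with hLA
    set LB := (pvCells (garden.length : Int)
        (if garden.isEmpty then 0 else PySem.Str.len (garden.headD ""))).filter
        (pvP garden dist (k + 1)) with hLB
    have hLBnd : LB.Nodup := (pvCells_nodup _ _).filter _
    have hLAB : ∀ x, x ∈ LB ↔ x ∈ LA := by
      intro x
      rw [hLB, hLA]
      rw [pvScan_mem garden dist k search hlook x]
      exact (pvDiscAll_congr garden search search.reverse dist.keys seen
        (fun y => (List.mem_reverse).symm) (fun y => (hseenK y).symm)).1 x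
    have hlenAB : LB.length = LA.length :=
      List.Perm.length_eq ((List.perm_ext_iff_of_nodup hLBnd (pvNodup_discAll garden _ _)).2 hLAB)
    have hbr : b_round garden (garden.length : Int)
        (if garden.isEmpty then 0 else PySem.Str.len (garden.headD "")) (k + 1) dist k =
        (PySem.Dict.mk (dist.items ++ LB.map (fun c => (c, k + 1))),
         (if LB.isEmpty then k else k + 1), (false || !LB.isEmpty)) := by
      rw [pvBRound_eq_scan, show ((dist, k, false) :
          PySem.Dict (Int × Int) Int × Int × Bool) =
        (PySem.Dict.mk (dist.items ++ ([] : List (Int × Int)).map (fun c => (c, k + 1))), k, false)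
        from by simp,
        pvBScanAux garden dist (k + 1) _ [] k false (pvCells_nodup _ _) (by simp)]
      rw [← hLB]
      simp only [List.nil_append]
    by_cases hempty : LA.length = 0
    · -- the new layer is empty: both loops stop here
      have hLAnil : LA = [] := List.eq_nil_of_length_eq_zero hempty
      have hLBnil : LB = [] := List.eq_nil_of_length_eq_zero (by omega)
      have hbr0 : b_round garden (garden.length : Int)
          (if garden.isEmpty then 0 else PySem.Str.len (garden.headD "")) (k + 1) dist k =
          (dist, k, false) := by
        rw [hbr, hLBnil]
        refine Prod.ext ?_ (Prod.ext ?_ ?_) <;> simp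
      rw [if_pos hempty, hbr0, if_pos rfl]
      show pvCRel n (nr ++ [((LA.length : Nat) : Int)]) k (dist, k)
      refine ⟨?_, ?_, ?_, ?_⟩
      · intro idx h
        rw [List.length_append, List.length_singleton] at h
        by_cases hidx : idx < nr.length
        · rw [List.getElem_append_left hidx]
          exact hcnt idx hidx
        · have hidx' : idx = nr.length := by omega
          subst hidx'
          rw [List.getElem_concat_length]
          have hz : pvCnt dist (nr.length : Int) = 0 := by
            unfold pvCnt
            have hz0 : dist.items.countP (fun e => e.2 == (nr.length : Int)) = 0 := by
              rw [List.countP_eq_zero]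
              intro e he
              have := hvals e he
              simp only [beq_iff_eq]
              intro hcontra
              omega
            rw [hz0]
            rfl
          rw [hz, hempty]
          rfl
          rfl
      · intro e he
        have h1 := hvals e he
        rw [List.length_append, List.length_singleton]
        push_cast
        omega
      · left
        rw [List.length_append, List.length_singleton]
        omega
      · show k = min k (n - 1)
        omega
    · -- the new layer is nonempty: recurse
      rw [if_neg hempty]
      have hLBne : LB ≠ [] := by
        intro hnil
        apply hempty
        rw [← hlenAB, hnil]
        rfl
      have hbr1 : b_round garden (garden.length : Int)
          (if garden.isEmpty then 0 else PySem.Str.len (garden.headD "")) (k + 1) dist k =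
          (PySem.Dict.mk (dist.items ++ LB.map (fun c => (c, k + 1))), k + 1, true) := by
        rw [hbr]
        simp [List.isEmpty_iff, hLBne]
      rw [hbr1, if_neg (by simp)]
      have hmm : (n - (k + 1)).toNat < m := by omega
      have hLAmem := fun x => pvMem_discAll garden search.reverse seen x
      have hkeys' := pvKeys_aug dist LB (k + 1)
      have hvalmem : ∀ e ∈ (PySem.Dict.mk (dist.items ++ LB.map (fun c => (c, k + 1)))).items,
          e ∈ dist.items ∨ (e.1 ∈ LB ∧ e.2 = k + 1) := by
        intro e he
        rcases List.mem_append.1 he with he | he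
        · exact Or.inl he
        · obtain ⟨c, hc, rfl⟩ := List.mem_map.1 he
          exact Or.inr ⟨hc, rfl⟩
      have hLBkeys : ∀ x ∈ LB, x ∉ dist.keys := by
        intro x hx
        have hP := (List.mem_filter.1 (hLB ▸ hx)).2
        simp only [pvP, Bool.and_eq_true, Bool.not_eq_true'] at hP
        rw [← PySem.Dict.contains_iff_mem_keys]
        simp [hP.1.2]
      have happly := ih _ hmm (k + 1) (seen ++ LA) LA (nr ++ [((LA.length : Nat) : Int)])
        (PySem.Dict.mk (dist.items ++ LB.map (fun c => (c, k + 1))))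
        rfl (by omega) (by omega)
        -- seen' nodup
        (by
          refine List.Nodup.append hseenN (pvNodup_discAll garden _ _) ?_
          intro x hx1 hx2
          exact ((hLAmem x).1 hx2).1 hx1)
        -- seen' membership = keys'
        (by
          intro x
          rw [hkeys', List.mem_append, List.mem_append, hseenK, hLAB])
        -- keys' nodup
        (by
          rw [hkeys']
          exact List.Nodup.append hkeysN hLBnd (fun a ha hb => hLBkeys a hb ha))
        (pvNodup_discAll garden _ _)
        (by intro h0; rw [h0] at hempty; exact hempty rfl)
        -- nr' length
        (by
          rw [List.length_append, List.length_singleton]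
          push_cast
          omega)
        -- counts
        (by
          intro idx h
          rw [List.length_append, List.length_singleton] at h
          have hsplit : pvCnt (PySem.Dict.mk (dist.items ++ LB.map (fun c => (c, k + 1))))
              (idx : Int) = pvCnt dist (idx : Int) +
              ((LB.map (fun c => (c, k + 1))).countP (fun e => e.2 == (idx : Int)) : Int) := by
            unfold pvCnt
            rw [List.countP_append]
            push_cast
            ring
          by_cases hidx : idx < nr.length
          · rw [List.getElem_append_left hidx, hsplit]
            have hzero : (LB.map (fun c => (c, k + 1))).countP
                (fun e => e.2 == (idx : Int)) = 0 := by
              rw [List.countP_eq_zero]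
              intro e he
              obtain ⟨c, hc, rfl⟩ := List.mem_map.1 he
              simp only [beq_iff_eq]
              intro hcontra
              omega
            rw [hzero, hcnt idx hidx]
            push_cast
            ring
          · have hidx' : idx = nr.length := by omega
            subst hidx'
            rw [List.getElem_concat_length, hsplit]
            have hz : pvCnt dist (nr.length : Int) = 0 := by
              unfold pvCnt
              have : dist.items.countP (fun e => e.2 == (nr.length : Int)) = 0 := by
                rw [List.countP_eq_zero]
                intro e he
                have := hvals e he
                simp only [beq_iff_eq]
                intro hcontra
                omega
              rw [this]
              rfl
            have hfull : (LB.map (fun c => (c, k + 1))).countP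
                (fun e => e.2 == (nr.length : Int)) = LB.length := by
              have : (LB.map (fun c => (c, k + 1))).countP
                  (fun e => e.2 == (nr.length : Int)) =
                  (LB.map (fun c => (c, k + 1))).length := by
                rw [List.countP_eq_length]
                intro e he
                obtain ⟨c, hc, rfl⟩ := List.mem_map.1 he
                simp only [beq_iff_eq]
                omega
              rw [this, List.length_map]
            rw [hz, hfull, hlenAB]
            ring
            rfl)
        -- value bounds
        (by
          intro e he
          rcases hvalmem e he with he | ⟨-, he2⟩
          · have := hvals e he
            omega
          · omega)
        -- lookup at the new distance is membership in the new frontier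
        (by
          intro x
          rw [pvGet?_aug]
          by_cases hxk : x ∈ dist.keys
          · have hxLA : x ∉ LA := by
              intro hx
              rw [hLA] at hx
              exact ((hLAmem x).1 hx).1 ((hseenK x).2 hxk)
            have hsome : (dist.get? x).isSome = true := by
              rw [← PySem.Dict.contains_eq_isSome_get?]
              exact (PySem.Dict.contains_iff_mem_keys dist x).2 hxk
            obtain ⟨v, hv⟩ := Option.isSome_iff_exists.1 hsome
            have hvv : (x, v) ∈ dist.items := PySem.Dict.mem_items_of_get?_eq_some dist hv
            have hvb := hvals _ hvv
            rw [hv]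
            rw [Option.some_or]
            constructor
            · intro hc
              have : v = k + 1 := by injection hc
              omega
            · intro hc
              exact absurd hc hxLA
          · have hnone : dist.get? x = none := by
              rw [PySem.Dict.get?_eq_none_iff_not_mem_keys]
              exact hxk
            rw [hnone]
            simp only [Option.or]
            split_ifs with hmem
            · simp [(hLAB x).1 hmem]
            · simp only [hLAB x] at hmem
              simp [hmem])
      have hacc : k + 1 - 1 = k := by ring
      rw [hacc] at happly
      exact happly

theorem pvOuter (garden : List String) (n : Int) (k : Int)
    (seen search : List (Int × Int)) (nr : List Int)
    (dist : PySem.Dict (Int × Int) Int)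
    (hk0 : 0 ≤ k) (hkn : k ≤ n)
    (hseenN : seen.Nodup)
    (hseenK : ∀ x, x ∈ seen ↔ x ∈ dist.keys)
    (hkeysN : dist.keys.Nodup)
    (hsN : search.Nodup)
    (hne : search ≠ [])
    (hlen : (nr.length : Int) = k + 1)
    (hcnt : ∀ idx : Nat, (h : idx < nr.length) → nr[idx] = pvCnt dist (idx : Int))
    (hvals : ∀ e ∈ dist.items, 0 ≤ e.2 ∧ e.2 ≤ k)
    (hlook : ∀ x, dist.get? x = some k ↔ x ∈ search) :
    pvCRel n
      (pvALoopR garden (PySem.List.pyRange k n 1) seen search nr (k - 1)).1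
      (pvALoopR garden (PySem.List.pyRange k n 1) seen search nr (k - 1)).2
      (pvBLoopR garden (garden.length : Int)
        (if garden.isEmpty then 0 else PySem.Str.len (garden.headD ""))
        (PySem.List.pyRange (k + 1) (n + 1) 1) dist k) :=
  pvOuterAux garden n ((n - k).toNat) k seen search nr dist rfl hk0 hkn hseenN hseenK
    hkeysN hsN hne hlen hcnt hvals hlook

theorem pvFilterMapSome {α β : Type} (l : List α) (f : α → Option β) (g : α → β)
    (h : ∀ a ∈ l, f a = some (g a)) : l.filterMap f = l.map g := by
  induction l with
  | nil => simp
  | cons a l ih =>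
    rw [List.filterMap_cons, h a (List.mem_cons_self ..), List.map_cons,
      ih (fun b hb => h b (List.mem_cons_of_mem _ hb))]

-- evaluating the step-2 slice sum
theorem pvSliceSum (nr : List Int) (s : Nat) (hs : s < nr.length) :
    a_slice_sum nr (s : Int) =
      ((List.range ((nr.length - s + 1) / 2)).map (fun (k : Nat) => nr[s + 2 * k]?.getD 0)).sum := by
  have h0 : ¬ ((s : Int) < 0) := by omega
  have hmin : min (s : Int) (nr.length : Int) = (s : Int) := by omega
  have hlt : (s : Int) < (nr.length : Int) := by omega
  have hcnt : ((((nr.length : Int) - (s : Int)) + 2 - 1) / 2).toNat = (nr.length - s + 1) / 2 := by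
    omega
  unfold a_slice_sum
  rw [PySem.List.slice?, if_neg (by norm_num)]
  simp only [PySem.List.sliceIndices]
  norm_num [h0, hmin, hlt, hcnt]
  have hsome : ∀ x ∈ List.range ((nr.length - s + 1) / 2),
      nr[((s : Int) + 2 * (x : Int)).toNat]? = some (nr[s + 2 * x]?.getD 0) := by
    intro k hk
    rw [List.mem_range] at hk
    have hlt2 : s + 2 * k < nr.length := by omega
    have hidx : ((s : Int) + 2 * (k : Int)).toNat = s + 2 * k := by omega
    rw [hidx, List.getElem?_eq_getElem hlt2]
    simp
  rw [pvFilterMapSome _ _ _ hsome]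

theorem pvIndSum0 (s : Nat) (v : Int) (m : Nat)
    (h : ∀ k, k < m → v ≠ ((s : Int) + 2 * (k : Int))) :
    ((List.range m).map (fun (k : Nat) => if v == ((s : Int) + 2 * (k : Int)) then (1:Int) else 0)).sum
      = 0 := by
  induction m with
  | zero => simp
  | succ m ih =>
    rw [List.range_succ, List.map_append, List.sum_append,
      ih (fun k hk => h k (Nat.lt_succ_of_lt hk))]
    have hm := h m (Nat.lt_succ_self m)
    simp
    omega

theorem pvIndSum1 (s : Nat) (v : Int) (m : Nat) (k0 : Nat) (hk0 : k0 < m)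
    (hv : v = ((s : Int) + 2 * (k0 : Int))) :
    ((List.range m).map (fun (k : Nat) => if v == ((s : Int) + 2 * (k : Int)) then (1:Int) else 0)).sum
      = 1 := by
  induction m with
  | zero => omega
  | succ m ih =>
    rw [List.range_succ, List.map_append, List.sum_append]
    by_cases hk : k0 = m
    · subst hk
      rw [pvIndSum0 s v k0 (by intro k hk heq; omega)]
      simp [hv]
    · rw [ih (by omega)]
      have hne : v ≠ ((s : Int) + 2 * (m : Int)) := by intro he; omega
      simp
      omega

-- a parity count is the sum of the per-distance counts
theorem pvParityCount (L s : Nat) (hs : s < L) (hs1 : s ≤ 1) (vals : List Int)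
    (hv : ∀ v ∈ vals, 0 ≤ v ∧ v < (L : Int)) :
    ((vals.countP (fun v => PySem.Int.mod v 2 == (s : Int))) : Int) =
      ((List.range ((L - s + 1) / 2)).map
        (fun (k : Nat) => ((vals.countP (fun v => v == ((s : Int) + 2 * (k : Int)))) : Int))).sum := by
  induction vals with
  | nil => simp
  | cons v vs ih =>
    have hv0 := hv v (List.mem_cons_self ..)
    have hvs := fun w hw => hv w (List.mem_cons_of_mem _ hw)
    rw [List.countP_cons]
    push_cast
    rw [ih hvs]
    have hmap : (List.range ((L - s + 1) / 2)).map
        (fun (k : Nat) => ((List.countP (fun w => w == ((s : Int) + 2 * (k : Int))) (v :: vs) : Int))) =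
        (List.range ((L - s + 1) / 2)).map
        (fun (k : Nat) => ((List.countP (fun w => w == ((s : Int) + 2 * (k : Int))) vs : Int) +
          (if v == ((s : Int) + 2 * (k : Int)) then (1:Int) else 0))) := by
      refine List.map_congr_left fun k hk => ?_
      rw [List.countP_cons]
      push_cast
      split_ifs <;> simp
    rw [hmap, PySem.List.sum_map_add_int]
    have hfm : PySem.Int.mod v 2 = v % 2 := by
      simp [PySem.Int.mod, Int.fmod_eq_emod]
    have hparind : (if (PySem.Int.mod v 2 == (s : Int)) = true then (1:Int) else 0) =
        ((List.range ((L - s + 1) / 2)).map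
          (fun (k : Nat) => if v == ((s : Int) + 2 * (k : Int)) then (1:Int) else 0)).sum := by
      by_cases hpar : v % 2 = (s : Int)
      · rw [pvIndSum1 s v _ ((v.toNat - s) / 2) (by omega) (by omega)]
        simp [hpar]
      · rw [pvIndSum0 s v _ (by intro k hk he; apply hpar; omega)]
        simp [hpar]
    rw [← hparind]

theorem base_reachable_fun_py_witness_ok :
    Dom_base_reachable_fun_py (pvWitness_base_reachable_fun_py.1) (pvWitness_base_reachable_fun_py.2.1) (pvWitness_base_reachable_fun_py.2.2) ∧
    Pre_base_reachable_fun_py (pvWitness_base_reachable_fun_py.1) (pvWitness_base_reachable_fun_py.2.1) (pvWitness_base_reachable_fun_py.2.2) := by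
  decide

theorem pvValuesCount (distF : PySem.Dict (Int × Int) Int) (d : Int) :
    (distF.values.countP (fun v => v == d) : Int) = pvCnt distF d := by
  unfold pvCnt
  show ((distF.items.map (fun e => e.2)).countP (fun v => v == d) : Int) = _
  rw [List.countP_map]
  rfl

-- ===== VERDICT (by name: the statement is the Claim_ definition above) =====
theorem base_reachable_fun_py_spec : Claim_equal_base_reachable_fun_py := by
  intro garden start_pos n_steps _hdom hpre
  obtain ⟨hn1, -⟩ := hpre
  show base_reachable_fun_py garden start_pos n_steps =
    base_reachable_fun_py_alt garden start_pos n_steps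
  have hcon0 : (PySem.Dict.empty : PySem.Dict (Int × Int) Int).contains start_pos = false := by
    rfl
  have hd0 : ((PySem.Dict.empty : PySem.Dict (Int × Int) Int).insert start_pos 0) =
      PySem.Dict.mk [(start_pos, 0)] := by
    apply PySem.Dict.ext
    rw [PySem.Dict.items_insert_of_not_contains _ _ hcon0]
    rfl
  have hset : PySem.Set.ofList [start_pos] = [start_pos] :=
    PySem.Set.ofList_eq_self_of_nodup _ (List.nodup_singleton _)
  have hrel := pvOuter garden n_steps 0 [start_pos] [start_pos] [1]
    (PySem.Dict.mk [(start_pos, 0)])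
    (le_refl 0) (by omega)
    (List.nodup_singleton _)
    (by intro x; simp [PySem.Dict.keys])
    (by simp [PySem.Dict.keys])
    (List.nodup_singleton _)
    (by simp)
    (by simp)
    (by
      intro idx h
      have hidx : idx = 0 := by simpa using h
      subst hidx
      show (1 : Int) = pvCnt (PySem.Dict.mk [(start_pos, 0)]) ((0 : Nat) : Int)
      unfold pvCnt
      simp)
    (by intro e he; simp at he; simp [he])
    (by
      intro x
      rw [PySem.Dict.get?_mk_cons]
      constructor
      · intro h
        split at h
        · rename_i hx
          simp [(beq_iff_eq.1 hx).symm]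
        · exact absurd h (by simp [show (PySem.Dict.mk ([] : List ((Int × Int) × Int))).get? x = none from rfl])
      · intro h
        rw [List.mem_singleton] at h
        subst h
        simp)
  have h01 : (0 : Int) - 1 = -1 := by norm_num
  have h0p1 : (0 : Int) + 1 = 1 := by norm_num
  rw [h01, h0p1] at hrel
  obtain ⟨hcntF, hbounds, hlen2, hmin⟩ := hrel
  unfold base_reachable_fun_py base_reachable_fun_py_alt
  rw [pvALoop_pyRange, pvBLoop_pyRange, hset, hd0]
  set RES := pvALoopR garden (PySem.List.pyRange 0 n_steps 1) [start_pos] [start_pos] [1] (-1)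
    with hRES
  set BRES := pvBLoopR garden (garden.length : Int)
    (if garden.isEmpty then 0 else PySem.Str.len (garden.headD ""))
    (PySem.List.pyRange 1 (n_steps + 1) 1) (PySem.Dict.mk [(start_pos, 0)]) 0
    with hBRES
  have hL2 : 2 ≤ RES.1.length := by
    rcases hlen2 with h | h
    · exact h
    · omega
  have hm2 : PySem.Int.mod n_steps 2 = n_steps % 2 := by
    simp [PySem.Int.mod, Int.fmod_eq_emod]
  have hsN : ((n_steps % 2).toNat : Int) = PySem.Int.mod n_steps 2 := by
    rw [hm2]; omega
  set sN : Nat := (n_steps % 2).toNat with hsNdef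
  have hs1 : sN ≤ 1 := by omega
  have hsL : sN < RES.1.length := by omega
  have hvbound : ∀ v ∈ BRES.1.values, 0 ≤ v ∧ v < (RES.1.length : Int) := by
    intro v hv
    obtain ⟨e, he, rfl⟩ := List.mem_map.1 hv
    have := hbounds e he
    omega
  refine Prod.ext ?_ ?_
  · show a_slice_sum RES.1 (PySem.Int.mod n_steps 2) =
      ((BRES.1.values.filter
        (fun v => PySem.Int.mod v 2 == PySem.Int.mod n_steps 2)).length : Int)
    rw [← hsN, pvSliceSum RES.1 sN hsL, ← List.countP_eq_length_filter,
      pvParityCount RES.1.length sN hsL hs1 BRES.1.values hvbound]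
    refine congrArg List.sum (List.map_congr_left ?_)
    intro k hk
    rw [List.mem_range] at hk
    have hklt : sN + 2 * k < RES.1.length := by omega
    rw [List.getElem?_eq_getElem hklt]
    show RES.1[sN + 2 * k] = _
    rw [hcntF (sN + 2 * k) hklt, ← pvValuesCount BRES.1]
    push_cast
    ring_nf
  · show RES.2 = min BRES.2 (n_steps - 1)
    exact hmin
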